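-- pv_equiv track=rewrite | github.com/Jamesellis51015/Multi-Agent-Path-Finding-with-Reinforcement-Learning | utils/ODM_star.py | _is_pos_colliding
-- ===== SOURCE A (Python) =====
-- def _is_pos_colliding(v_pos):
--     '''Returns set of coll agents '''
--     hldr = set()
--     for i, vi in enumerate(v_pos):
--         for i2, vi2 in enumerate(v_pos):
--             if i != i2:
--                 if vi == vi2:
--                     hldr.add(i)
--                     hldr.add(i2)
--     return hldr
-- ===== SOURCE B (Python) =====
-- def _is_pos_colliding(v_pos):
--     '''Returns set of coll agents '''
--     groups = {}
--     for i, vi in enumerate(v_pos):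
--         key = tuple(vi)
--         groups[key] = groups.get(key, []) + [i]
--     hldr = set()
--     for grp in groups.values():
--         if len(grp) >= 2:
--             hldr.update(grp)
--     return hldr
-- ===== Notes on version B (the rewrite author's own statement) =====
-- stated objective: faster
-- what changed: Replaces A's quadratic all-pairs comparison loop with a single pass that groups indices by position in a dict and collects every group of size >= 2.
import Mathlib
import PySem

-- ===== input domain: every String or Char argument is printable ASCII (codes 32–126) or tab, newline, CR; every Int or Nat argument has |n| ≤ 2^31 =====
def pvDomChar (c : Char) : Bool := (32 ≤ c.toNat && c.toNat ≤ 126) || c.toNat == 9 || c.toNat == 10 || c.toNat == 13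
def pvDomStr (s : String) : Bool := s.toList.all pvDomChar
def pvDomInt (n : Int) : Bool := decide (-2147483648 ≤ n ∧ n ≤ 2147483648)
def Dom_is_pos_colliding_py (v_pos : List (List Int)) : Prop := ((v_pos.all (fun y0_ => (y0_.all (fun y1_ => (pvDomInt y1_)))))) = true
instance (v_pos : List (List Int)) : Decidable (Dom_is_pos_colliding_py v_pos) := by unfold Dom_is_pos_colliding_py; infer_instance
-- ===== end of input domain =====

-- B groups the indices by position in one dict pass and collects the groups of size ≥ 2,
-- replacing A's all-pairs double scan (objective: faster).

-- ===== PORT A =====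
def is_pos_colliding_py (v_pos : List (List Int)) : List Int :=
  (PySem.List.enumerate v_pos).foldl
    (fun hldr pi =>
      (PySem.List.enumerate v_pos).foldl
        (fun h pj =>
          if pi.1 ≠ pj.1 then
            if pi.2 = pj.2 then PySem.Set.add (PySem.Set.add h pi.1) pj.1 else h
          else h)
        hldr)
    PySem.Set.empty

-- ===== PORT B =====
def pvGroups (v_pos : List (List Int)) : PySem.Dict (List Int) (List Int) :=
  (PySem.List.enumerate v_pos).foldl
    (fun d p => d.modify p.2 [] (fun g => g ++ [p.1])) PySem.Dict.empty

def is_pos_colliding_py_alt (v_pos : List (List Int)) : List Int :=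
  (pvGroups v_pos).values.foldl
    (fun hldr grp => if 2 ≤ grp.length then PySem.Set.update hldr grp else hldr)
    PySem.Set.empty

-- ===== PRECONDITION & SPEC =====
def Spec_is_pos_colliding_py (v_pos : List (List Int)) (out : List Int) : Prop := out = is_pos_colliding_py_alt v_pos
instance (v_pos : List (List Int)) (out : List Int) : Decidable (Spec_is_pos_colliding_py v_pos out) := by unfold Spec_is_pos_colliding_py; infer_instance

-- ===== CLAIM (what is proved, stated in full; the proofs are below) =====
def Claim_equal_is_pos_colliding_py : Prop := ∀ (v_pos : List (List Int)), Dom_is_pos_colliding_py v_pos → Spec_is_pos_colliding_py v_pos (is_pos_colliding_py v_pos)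

-- ===== LEMMAS AND PROOFS =====

-- the ascending list of indices of v whose entry equals p

def pvGrp (v : List (List Int)) (p : List Int) : List Int :=
  ((PySem.List.enumerate v).filter (fun q => q.2 == p)).map (fun q => q.1)

-- the common canonical value: for each distinct position (first-occurrence order), all of its
-- indices if the position occurs at least twice
def pvCanon (v : List (List Int)) (l : List (List Int)) : List Int :=
  (PySem.List.dedup l).flatMap (fun p => if 2 ≤ (pvGrp v p).length then pvGrp v p else [])

theorem pvNodup_fst_filter (v : List (List Int)) (P : Int × List Int → Bool) :
    ((((PySem.List.enumerate v).filter P)).map (fun q => q.1)).Nodup := by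
  have h1 := PySem.List.pairwise_lt_enumerate v 0
  have h2 : (((PySem.List.enumerate v).filter P)).Pairwise (fun p q => p.1 < q.1) :=
    List.Pairwise.sublist (List.filter_sublist) h1
  have h3 : ((((PySem.List.enumerate v).filter P)).map (fun q => q.1)).Pairwise (· < ·) :=
    List.pairwise_map.mpr h2
  exact h3.imp (fun {a b} hl => ne_of_lt hl)

theorem pvMem_grp (v : List (List Int)) (p : List Int) (i : Int) :
    i ∈ pvGrp v p ↔ ∃ (k : Nat) (_ : k < v.length), i = (k : Int) ∧ v[k] = p := by
  constructor
  · intro h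
    simp only [pvGrp, List.mem_map, List.mem_filter, PySem.List.mem_enumerate_iff] at h
    obtain ⟨a, ⟨⟨k, hk, rfl⟩, hb⟩, rfl⟩ := h
    exact ⟨k, hk, by simp, by simpa using hb.symm⟩
  · rintro ⟨k, hk, rfl, rfl⟩
    simp only [pvGrp, List.mem_map, List.mem_filter, PySem.List.mem_enumerate_iff]
    exact ⟨(k, v[k]), ⟨⟨k, hk, by simp⟩, by simp⟩, rfl⟩

theorem pvGrp_unique (v : List (List Int)) (p q : List Int) (i : Int)
    (hp : i ∈ pvGrp v p) (hq : i ∈ pvGrp v q) : p = q := by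
  rw [pvMem_grp] at hp hq
  obtain ⟨k, hk, rfl, rfl⟩ := hp
  obtain ⟨k', hk', hkk, rfl⟩ := hq
  have : k' = k := by exact_mod_cast hkk.symm
  subst this; rfl

theorem pvNodup_grp (v : List (List Int)) (p : List Int) : (pvGrp v p).Nodup :=
  pvNodup_fst_filter v _

theorem pvSet_add_mem {α : Type} [BEq α] [LawfulBEq α] (s : List α) (x : α) (h : x ∈ s) : PySem.Set.add s x = s := by
  simp [PySem.Set.add, PySem.Set.contains, h]

theorem pvSet_add_not_mem {α : Type} [BEq α] [LawfulBEq α] (s : List α) (x : α) (h : x ∉ s) :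
    PySem.Set.add s x = s ++ [x] := by
  simp [PySem.Set.add, PySem.Set.contains, h]

theorem pvSet_update_subset (l s : List Int) (h : ∀ x ∈ l, x ∈ s) :
    PySem.Set.update s l = s := by
  induction l generalizing s with
  | nil => rfl
  | cons x t ih =>
    have : PySem.Set.add s x = s := pvSet_add_mem s x (h x (by simp))
    simp only [PySem.Set.update, List.foldl_cons] at *
    rw [this]
    exact ih s (fun y hy => h y (by simp [hy]))

theorem pvSet_update_fresh (l s : List Int) (hnd : l.Nodup) (h : ∀ x ∈ l, x ∉ s) :
    PySem.Set.update s l = s ++ l := by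
  induction l generalizing s with
  | nil => simp [PySem.Set.update]
  | cons x t ih =>
    simp only [PySem.Set.update, List.foldl_cons] at *
    rw [pvSet_add_not_mem s x (h x (by simp))]
    rw [ih (s ++ [x]) hnd.of_cons]
    · simp
    · intro y hy
      simp only [List.mem_append, List.mem_singleton]
      rintro (hs | rfl)
      · exact h y (by simp [hy]) hs
      · exact (List.nodup_cons.mp hnd).1 hy

-- the inner loop of A adds the pair [i, q.1] for every matching enumerate entry q
theorem pvInner_shape (i : Int) (vi : List Int) (l : List (Int × List Int)) (h : List Int) :
    l.foldl
      (fun h q =>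
        if i ≠ q.1 then
          if vi = q.2 then PySem.Set.add (PySem.Set.add h i) q.1 else h
        else h) h
    = PySem.Set.update h
        ((l.filter (fun q => decide (i ≠ q.1) && decide (vi = q.2))).flatMap (fun q => [i, q.1])) := by
  induction l generalizing h with
  | nil => rfl
  | cons q t ih =>
    simp only [List.foldl_cons, List.filter_cons]
    by_cases h1 : i ≠ q.1
    · by_cases h2 : vi = q.2
      · rw [if_pos h1, if_pos h2, if_pos (by simp [h1, h2]), ih]
        simp [PySem.Set.update]
      · rw [if_pos h1, if_neg h2, if_neg (by simp [h2]), ih]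
    · rw [if_neg h1, if_neg (by simp [not_not.mp h1]), ih]

theorem pvUpdate_pairs (ms s : List Int) (k : Int) (hk : k ∈ s)
    (hfresh : ∀ j ∈ ms, j ∉ s) (hnd : ms.Nodup) :
    PySem.Set.update s (ms.flatMap (fun j => [k, j])) = s ++ ms := by
  induction ms generalizing s with
  | nil => simp [PySem.Set.update]
  | cons j t ih =>
    simp only [List.flatMap_cons, PySem.Set.update, List.foldl_cons, List.foldl_append] at *
    rw [pvSet_add_mem s k hk, pvSet_add_not_mem s j (hfresh j (by simp))]
    simp only [List.foldl_nil]
    rw [ih (s ++ [j]) (by simp [hk]) ?_ hnd.of_cons]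
    · simp
    · intro y hy
      simp only [List.mem_append, List.mem_singleton]
      rintro (hs | rfl)
      · exact hfresh y (by simp [hy]) hs
      · exact (List.nodup_cons.mp hnd).1 hy

theorem pvUpdate_group (s ms : List Int) (k : Int) (hk : k ∉ s)
    (hfresh : ∀ j ∈ ms, j ∉ s) (hnd : ms.Nodup) (hkms : k ∉ ms) :
    PySem.Set.update s (ms.flatMap (fun j => [k, j])) =
      if ms = [] then s else s ++ k :: ms := by
  cases ms with
  | nil => simp [PySem.Set.update]
  | cons j t =>
    simp only [List.flatMap_cons, if_neg (List.cons_ne_nil j t)]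
    rw [show PySem.Set.update s ([k, j] ++ t.flatMap (fun j => [k, j]))
        = PySem.Set.update (PySem.Set.update s [k, j]) (t.flatMap (fun j => [k, j]))
      from by simp [PySem.Set.update, List.foldl_append]]
    have hjs : j ∉ s := hfresh j (by simp)
    have hkj : k ≠ j := fun hc => hkms (hc ▸ by simp)
    have h2 : PySem.Set.update s [k, j] = s ++ [k, j] :=
      pvSet_update_fresh [k, j] s (by simp [hkj])
        (by intro x hx; rcases List.mem_pair.mp hx with rfl | rfl; exacts [hk, hjs])
    rw [h2, pvUpdate_pairs t (s ++ [k, j]) k (by simp) ?_ (List.nodup_cons.mp hnd).2]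
    · simp
    · intro y hy
      simp only [List.mem_append, List.mem_pair]
      rintro (hys | rfl | rfl)
      · exact hfresh y (by simp [hy]) hys
      · exact hkms (by simp [hy])
      · exact (List.nodup_cons.mp hnd).1 hy

theorem pvMem_canon (v : List (List Int)) (l : List (List Int)) (i : Int)
    (h : i ∈ pvCanon v l) : ∃ p ∈ l, i ∈ pvGrp v p := by
  simp only [pvCanon, List.mem_flatMap] at h
  obtain ⟨p, hp, hi⟩ := h
  refine ⟨p, ?_, ?_⟩
  · have := (PySem.List.mem_dedup l p).mp hp
    exact this
  · split at hi
    · exact hi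
    · simp at hi

theorem pvTwo_le_length (l : List Int) (a b : Int) (ha : a ∈ l) (hb : b ∈ l) (hne : a ≠ b) :
    2 ≤ l.length := by
  match l with
  | [] => simp at ha
  | [x] => simp at ha hb; exact absurd (ha.trans hb.symm) hne
  | x :: y :: t => simp

theorem pvEnum_split (v : List (List Int)) (m : Nat) (hm : m < v.length) :
    PySem.List.enumerate v 0
    = PySem.List.enumerate (v.take m) 0
      ++ ((m : Int), v[m]) :: PySem.List.enumerate (v.drop (m + 1)) ((m : Int) + 1) := by
  conv_lhs => rw [← List.take_append_drop m v, List.drop_eq_getElem_cons hm]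
  rw [PySem.List.enumerate_append, PySem.List.enumerate_cons]
  simp [List.length_take, Nat.min_eq_left (le_of_lt hm)]

-- outer loop invariant of A: after the first m outer iterations the set is pvCanon v (v.take m)
theorem pvOuter_invariant (v : List (List Int)) (m : Nat) (hm : m ≤ v.length) :
    (PySem.List.enumerate (v.take m)).foldl
      (fun hldr pi =>
        (PySem.List.enumerate v).foldl
          (fun h pj =>
            if pi.1 ≠ pj.1 then
              if pi.2 = pj.2 then PySem.Set.add (PySem.Set.add h pi.1) pj.1 else h
            else h)
          hldr)
      PySem.Set.empty
    = pvCanon v (v.take m) := by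
  induction m with
  | zero => simp [pvCanon, PySem.List.dedup_eq_ofList, PySem.Set.ofList, PySem.Set.empty, PySem.Set.update]
  | succ m ih =>
    have hm' : m < v.length := by omega
    rw [List.take_succ, List.getElem?_eq_getElem hm']
    simp only [Option.toList_some]
    rw [PySem.List.enumerate_append, List.foldl_append]
    rw [ih (by omega)]
    simp only [List.length_take, Nat.min_eq_left (le_of_lt hm'), PySem.List.enumerate_cons,
      PySem.List.enumerate_nil, List.foldl_cons, List.foldl_nil, Int.zero_add]
    rw [pvInner_shape ((m : Int)) (v[m])]
    set h := pvCanon v (v.take m) with hh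
    set L := (PySem.List.enumerate v).filter
        (fun q => decide ((m : Int) ≠ q.1) && decide (v[m] = q.2)) with hL
    set ms := L.map (fun q => q.1) with hms
    have hflat : L.flatMap (fun q => [((m : Int)), q.1]) = ms.flatMap (fun j => [((m : Int)), j]) := by
      rw [hms, List.flatMap_map]
    have hmsMem : ∀ j ∈ ms, j ∈ pvGrp v (v[m]) ∧ j ≠ (m : Int) := by
      intro j hj
      rw [hms] at hj
      obtain ⟨q, hq, rfl⟩ := List.mem_map.mp hj
      have hqf := List.mem_filter.mp hq
      constructor
      · exact List.mem_map.mpr ⟨q, List.mem_filter.mpr ⟨hqf.1, by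
          have h2 := (Bool.and_eq_true _ _ |>.mp hqf.2).2
          simp at h2
          simp [h2]⟩, rfl⟩
      · have h1 := (Bool.and_eq_true _ _ |>.mp hqf.2).1
        simp at h1
        exact fun hc => h1 hc.symm
    have hmsNodup : ms.Nodup := pvNodup_fst_filter v _
    have hmms : (m : Int) ∉ ms := fun hc => (hmsMem _ hc).2 rfl
    have hmGrp : (m : Int) ∈ pvGrp v (v[m]) := (pvMem_grp v _ _).mpr ⟨m, hm', rfl, rfl⟩
    have hCanonMem : ∀ i ∈ h, ∃ p ∈ v.take m, i ∈ pvGrp v p := fun i hi => pvMem_canon v _ i hi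
    by_cases hseen : v[m] ∈ v.take m
    · -- position already seen: no change on either side
      have hbig : 2 ≤ (pvGrp v (v[m])).length := by
        obtain ⟨k, hk, hkv⟩ := List.mem_take_iff_getElem.mp hseen
        have hkGrp : ((k : Nat) : Int) ∈ pvGrp v (v[m]) := by
          refine (pvMem_grp v _ _).mpr ⟨k, by omega, rfl, ?_⟩
          exact hkv
        refine pvTwo_le_length _ _ _ hkGrp hmGrp ?_
        have : k < m := by omega
        exact fun hc => absurd (by exact_mod_cast hc) (by omega)
      have hsub : ∀ x ∈ pvGrp v (v[m]), x ∈ h := by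
        intro x hx
        rw [hh]
        refine List.mem_flatMap.mpr ⟨v[m], ?_, by rw [if_pos hbig]; exact hx⟩
        simp only [PySem.List.dedup_eq_ofList]
        exact (PySem.Set.mem_ofList (v.take m) (v[m])).mpr hseen
      rw [hflat, pvSet_update_subset]
      · rw [hh, pvCanon, pvCanon]
        congr 1
        simp only [PySem.List.dedup_eq_ofList, PySem.Set.ofList_eq_foldl, List.foldl_append,
          List.foldl_cons, List.foldl_nil]
        exact (pvSet_add_mem _ _ ((PySem.Set.mem_ofList (v.take m) (v[m])).mpr hseen)).symm
      · intro x hx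
        obtain ⟨j, hj, hx⟩ := List.mem_flatMap.mp hx
        rcases List.mem_pair.mp hx with rfl | rfl
        · exact hsub _ hmGrp
        · exact hsub _ (hmsMem _ hj).1
    · -- fresh position: the whole group (if of size ≥ 2) is appended
      have hfreshGrp : ∀ x ∈ pvGrp v (v[m]), x ∉ h := by
        intro x hx hxh
        obtain ⟨p, hp, hxp⟩ := hCanonMem x hxh
        exact hseen (pvGrp_unique v _ _ x hx hxp ▸ hp)
      have hgrpEq : pvGrp v (v[m]) = (m : Int) :: ms := by
        rw [pvGrp, hms, hL, pvEnum_split v m hm']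
        rw [List.filter_append, List.filter_append, List.filter_cons, List.filter_cons]
        have hpre1 : (PySem.List.enumerate (v.take m) 0).filter (fun q => q.2 == v[m]) = [] := by
          rw [List.filter_eq_nil_iff]
          intro q hq
          obtain ⟨k, hk, rfl⟩ := (PySem.List.mem_enumerate_iff _ _ _).mp hq
          have hmem : (v.take m)[k] ∈ v.take m := List.getElem_mem hk
          have hne : (v.take m)[k] ≠ v[m] := fun hc => hseen (hc ▸ hmem)
          simpa using hne
        have hpre2 : (PySem.List.enumerate (v.take m) 0).filter
            (fun q => decide ((m : Int) ≠ q.1) && decide (v[m] = q.2)) = [] := by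
          rw [List.filter_eq_nil_iff]
          intro q hq
          obtain ⟨k, hk, rfl⟩ := (PySem.List.mem_enumerate_iff _ _ _).mp hq
          have hmem : (v.take m)[k] ∈ v.take m := List.getElem_mem hk
          have hne : (v.take m)[k] ≠ v[m] := fun hc => hseen (hc ▸ hmem)
          have hne2 : v[k]'(by simp at hk; omega) ≠ v[m] := by simpa using hne
          simp
          intro _
          exact fun hc => hne2 hc.symm
        have hsuf : (PySem.List.enumerate (v.drop (m + 1)) ((m : Int) + 1)).filter
              (fun q => decide ((m : Int) ≠ q.1) && decide (v[m] = q.2))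
            = (PySem.List.enumerate (v.drop (m + 1)) ((m : Int) + 1)).filter
              (fun q => q.2 == v[m]) := by
          apply List.filter_congr
          intro q hq
          obtain ⟨k, hk, rfl⟩ := (PySem.List.mem_enumerate_iff _ _ _).mp hq
          have h1 : ((m : Nat) : Int) ≠ ((m : Nat) : Int) + 1 + ((k : Nat) : Int) := by omega
          rw [Bool.eq_iff_iff]
          simp [h1]
          exact eq_comm
        rw [hpre1, hpre2, hsuf]
        simp
      have hcanonEq : pvCanon v (v.take m ++ [v[m]])
          = h ++ (if 2 ≤ (pvGrp v (v[m])).length then pvGrp v (v[m]) else []) := by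
        rw [hh, pvCanon, pvCanon]
        have hded : PySem.List.dedup (v.take m ++ [v[m]])
            = PySem.List.dedup (v.take m) ++ [v[m]] := by
          simp only [PySem.List.dedup_eq_ofList, PySem.Set.ofList_eq_foldl, List.foldl_append,
            List.foldl_cons, List.foldl_nil]
          exact pvSet_add_not_mem _ _
            (fun hc => hseen ((PySem.Set.mem_ofList (v.take m) (v[m])).mp hc))
        rw [hded, List.flatMap_append]
        simp
      rw [hcanonEq, hflat]
      rw [pvUpdate_group h ms (m : Int) (fun hc => hfreshGrp _ hmGrp hc)
        (fun j hj hc => hfreshGrp _ (hmsMem j hj).1 hc) hmsNodup hmms]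
      by_cases hnil : ms = []
      · rw [if_pos hnil]
        have h1 : pvGrp v (v[m]) = [(m : Int)] := by rw [hgrpEq, hnil]
        rw [h1]
        simp
      · rw [if_neg hnil, hgrpEq]
        have hlen : 2 ≤ ((m : Int) :: ms).length := by
          have := List.length_pos_iff.mpr hnil
          simp only [List.length_cons]
          omega
        rw [if_pos hlen]

theorem pvA_eq_canon (v : List (List Int)) : is_pos_colliding_py v = pvCanon v v := by
  have hinv := pvOuter_invariant v v.length (le_refl _)
  rw [List.take_length] at hinv
  exact hinv

theorem pvFold_groups (v : List (List Int)) (ps : List (List Int)) (acc : List Int)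
    (hnd : ps.Nodup) (hfresh : ∀ p ∈ ps, ∀ i ∈ pvGrp v p, i ∉ acc) :
    ps.foldl (fun out p => if 2 ≤ (pvGrp v p).length then PySem.Set.update out (pvGrp v p) else out) acc
    = acc ++ ps.flatMap (fun p => if 2 ≤ (pvGrp v p).length then pvGrp v p else []) := by
  induction ps generalizing acc with
  | nil => simp
  | cons p t ih =>
    simp only [List.foldl_cons, List.flatMap_cons]
    have hstep : (if 2 ≤ (pvGrp v p).length then PySem.Set.update acc (pvGrp v p) else acc)
        = acc ++ (if 2 ≤ (pvGrp v p).length then pvGrp v p else []) := by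
      split
      · exact pvSet_update_fresh _ _ (pvNodup_grp v p) (fun x hx => hfresh p (by simp) x hx)
      · simp
    rw [hstep, ih (acc ++ (if 2 ≤ (pvGrp v p).length then pvGrp v p else [])) hnd.of_cons ?_]
    · simp
    · intro q hq j hj
      simp only [List.mem_append]
      rintro (hacc | hgp)
      · exact hfresh q (by simp [hq]) j hj hacc
      · have hgp' : j ∈ pvGrp v p := by
          split at hgp
          · exact hgp
          · simp at hgp
        have : q = p := pvGrp_unique v q p j hj hgp'
        exact (List.nodup_cons.mp hnd).1 (this ▸ hq)

theorem pvB_eq_canon (v : List (List Int)) : is_pos_colliding_py_alt v = pvCanon v v := by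
  unfold is_pos_colliding_py_alt
  have hg : pvGroups v = (PySem.List.enumerate v).foldl
      (fun d p => d.modify p.2 [] (fun g => g ++ [p.1])) PySem.Dict.empty := rfl
  have hkeys : (pvGroups v).keys = PySem.List.dedup v := by
    rw [hg, PySem.Dict.keys_foldl_modify_key (PySem.List.enumerate v) (fun p => p.2) []
      (fun _ p => fun g => g ++ [p.1]) PySem.Dict.empty]
    simp [PySem.List.map_snd_enumerate]
    rfl
  have hnd : (pvGroups v).keys.Nodup := by
    rw [hkeys]; simp only [PySem.List.dedup_eq_ofList]; exact PySem.Set.nodup_ofList v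
  have hgetD : ∀ p, (pvGroups v).getD p [] = pvGrp v p := by
    intro p
    have hswap : pvGroups v = ((PySem.List.enumerate v).map Prod.swap).foldl
        (fun d q => d.modify q.1 [] (fun g => g ++ [q.2])) PySem.Dict.empty := by
      rw [hg, List.foldl_map]; rfl
    rw [hswap, PySem.Dict.getD_foldl_modify_append]
    simp [pvGrp, List.filter_map, List.map_map, Function.comp_def, Prod.swap]
  have hvals : (pvGroups v).values = (PySem.List.dedup v).map (fun p => pvGrp v p) := by
    rw [PySem.Dict.values_eq_map_keys (pvGroups v) hnd [], hkeys]
    exact List.map_congr_left (fun p _ => hgetD p)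
  rw [hvals, List.foldl_map]
  rw [pvFold_groups v (PySem.List.dedup v) PySem.Set.empty
    (by simp only [PySem.List.dedup_eq_ofList]; exact PySem.Set.nodup_ofList v)
    (by intro p _ i _ hi; simp [PySem.Set.empty] at hi)]
  simp [pvCanon, PySem.Set.empty]

-- ===== VERDICT (by name: the statement is the Claim_ definition above) =====
theorem is_pos_colliding_py_spec : Claim_equal_is_pos_colliding_py := by
  intro v _
  unfold Spec_is_pos_colliding_py
  rw [pvA_eq_canon, pvB_eq_canon]
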